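-- pv_equiv track=rewrite | github.com/popcon9424/algorithm | exam/2019naver_3.py | searchtime
-- ===== SOURCE A (Python) =====
-- def searchtime(cook_times, trees, k):
--     value = cook_times[k-1]
--     temp = 0
--     if k in trees:
--         for branch in trees[k]:
--             getvalue = searchtime(cook_times, trees, branch)
--             if getvalue > temp:
--                 temp = getvalue
--     return value + temp
-- ===== SOURCE B (Python) =====
-- def searchtime(cook_times, trees, k):
--     # Memoized DFS (dynamic programming): each node's best path time is
--     # computed once and cached, instead of A's naive recursion that
--     # recomputes shared subtrees.
--     memo = {}
--
--     def visit(node):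
--         if node in memo:
--             return memo[node]
--         best = 0
--         for child in trees.get(node, []):
--             v = visit(child)
--             if v > best:
--                 best = v
--         res = cook_times[node - 1] + best
--         memo[node] = res
--         return res
--
--     return visit(k)
-- ===== Notes on version B (the rewrite author's own statement) =====
-- stated objective: alternative
-- what changed: Replaces A's naive recursion (which recomputes every shared subtree) by a memoized DFS: a dict caches each node's best cumulative time, so every node is evaluated at most once.
import Mathlib
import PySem

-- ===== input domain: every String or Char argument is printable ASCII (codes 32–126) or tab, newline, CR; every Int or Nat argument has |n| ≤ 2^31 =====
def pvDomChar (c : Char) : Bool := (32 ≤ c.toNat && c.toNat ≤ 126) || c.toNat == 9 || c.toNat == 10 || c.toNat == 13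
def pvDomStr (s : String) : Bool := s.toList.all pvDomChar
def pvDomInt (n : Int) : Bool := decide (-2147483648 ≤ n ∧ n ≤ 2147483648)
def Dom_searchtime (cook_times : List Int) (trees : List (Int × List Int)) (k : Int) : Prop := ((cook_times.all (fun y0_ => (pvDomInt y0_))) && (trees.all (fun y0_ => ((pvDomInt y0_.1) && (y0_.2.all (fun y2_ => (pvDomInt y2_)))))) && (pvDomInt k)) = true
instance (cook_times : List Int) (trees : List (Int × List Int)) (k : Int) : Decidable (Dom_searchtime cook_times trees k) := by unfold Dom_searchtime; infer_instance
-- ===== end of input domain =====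

-- B replaces A's naive recursion by a memoized DFS (dynamic programming): each node's
-- value is computed once and cached in a dict, instead of being recomputed for every
-- occurrence of a shared subtree. Return values agree on all of Pre_.

-- ===== PORT A =====
-- fuel-indexed transliteration of A's recursion (fuel is only the totality device;
-- under Pre_ the recursion depth is at most (dict size + 1), so the fuel never runs out)
def searchtimeF (cook_times : List Int) (d : PySem.Dict Int (List Int)) : Nat → Int → Int
  | 0, _ => 0
  | n+1, k =>
    let value := PySem.List.pyGetD cook_times (k - 1) 0   -- cook_times[k-1]; Pre_ rules out IndexError
    let temp : Int :=
      match d.get? k with                                  -- 'if k in trees: for branch in trees[k]'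
      | some cs => cs.foldl (fun temp branch =>
          let getvalue := searchtimeF cook_times d n branch
          if getvalue > temp then getvalue else temp) 0
      | none => 0
    value + temp

def searchtime (cook_times : List Int) (trees : List (Int × List Int)) (k : Int) : Int :=
  let d := PySem.Dict.ofList trees
  searchtimeF cook_times d (d.size + 1) k

-- ===== PORT B =====
-- memoized DFS: goB threads the memo dict through the recursion (same fuel device)
def goB (cook_times : List Int) (d : PySem.Dict Int (List Int)) : Nat → PySem.Dict Int Int → Int → PySem.Dict Int Int × Int
  | 0, m, _ => (m, 0)
  | n+1, m, node =>
    match m.get? node with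
    | some v => (m, v)                                     -- 'if node in memo: return memo[node]'
    | none =>
      let st := (d.getD node []).foldl (fun (st : PySem.Dict Int Int × Int) c =>
          let r := goB cook_times d n st.1 c
          (r.1, if r.2 > st.2 then r.2 else st.2)) (m, 0)  -- 'for child in trees.get(node, [])'
      let res := PySem.List.pyGetD cook_times (node - 1) 0 + st.2
      (st.1.insert node res, res)                          -- 'memo[node] = res'

def searchtime_alt (cook_times : List Int) (trees : List (Int × List Int)) (k : Int) : Int :=
  let d := PySem.Dict.ofList trees
  (goB cook_times d (d.size + 1) PySem.Dict.empty k).2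

-- ===== PRECONDITION & SPEC =====
-- reachSet d k: the set of nodes reachable from k along the dict's child lists,
-- computed as the fixed point of one-step expansion (a shape property of the input
-- graph, not a re-run of the algorithm).
def reachStep (d : PySem.Dict Int (List Int)) (s : List Int) : List Int :=
  PySem.Set.update s (s.flatMap fun x => d.getD x [])

def reachFuel (d : PySem.Dict Int (List Int)) : Nat :=
  (d.items.flatMap Prod.snd).length + 1

def reachSet (d : PySem.Dict Int (List Int)) (k : Int) : List Int :=
  (reachStep d)^[reachFuel d] [k]

-- Pre_ excludes exactly the inputs on which A raises: a node reachable from k whose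
-- cook_times index is out of range (IndexError), or a cycle reachable from k, on which
-- A's recursion never returns (RecursionError). On every other input A returns and B matches it.
def Pre_searchtime (cook_times : List Int) (trees : List (Int × List Int)) (k : Int) : Prop :=
  (∀ x ∈ reachSet (PySem.Dict.ofList trees) k,
      (PySem.List.pyGet? cook_times (x - 1)).isSome = true) ∧
  (∀ x ∈ reachSet (PySem.Dict.ofList trees) k,
      ∀ c ∈ (PySem.Dict.ofList trees).getD x [],
        x ∉ reachSet (PySem.Dict.ofList trees) c)

instance (cook_times : List Int) (trees : List (Int × List Int)) (k : Int) : Decidable (Pre_searchtime cook_times trees k) := by unfold Pre_searchtime; infer_instance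

def pvWitness_searchtime : List Int × (List (Int × List Int)) × Int :=
  ([5, 3, 7], [(1, [2, 3]), (2, []), (3, [])], 1)

def Spec_searchtime (cook_times : List Int) (trees : List (Int × List Int)) (k : Int) (out : Int) : Prop := out = searchtime_alt cook_times trees k
instance (cook_times : List Int) (trees : List (Int × List Int)) (k : Int) (out : Int) : Decidable (Spec_searchtime cook_times trees k out) := by unfold Spec_searchtime; infer_instance

-- ===== CLAIM (what is proved, stated in full; the proofs are below) =====
def Claim_equal_searchtime : Prop := ∀ (cook_times : List Int) (trees : List (Int × List Int)) (k : Int), Dom_searchtime cook_times trees k → Pre_searchtime cook_times trees k → Spec_searchtime cook_times trees k (searchtime cook_times trees k)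

-- ===== LEMMAS AND PROOFS =====

-- ---- the reachable set: membership, closedness, transitivity ----

lemma mem_reachStep (d : PySem.Dict Int (List Int)) (s : List Int) (y : Int) :
    y ∈ reachStep d s ↔ y ∈ s ∨ ∃ x ∈ s, y ∈ d.getD x [] := by
  simp [reachStep, PySem.Set.mem_update, List.mem_flatMap]

lemma subset_reachStep (d : PySem.Dict Int (List Int)) (s : List Int) :
    s ⊆ reachStep d s := by
  intro y hy; exact (mem_reachStep d s y).mpr (Or.inl hy)

lemma reachStep_toFinset_congr (d : PySem.Dict Int (List Int)) (s t : List Int)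
    (h : s.toFinset = t.toFinset) :
    (reachStep d s).toFinset = (reachStep d t).toFinset := by
  ext y
  simp only [List.mem_toFinset, mem_reachStep]
  have hm : ∀ x : Int, x ∈ s ↔ x ∈ t := by
    intro x
    rw [← List.mem_toFinset, ← List.mem_toFinset, h]
  constructor
  · rintro (hy | ⟨x, hx, hy⟩)
    · exact Or.inl ((hm y).mp hy)
    · exact Or.inr ⟨x, (hm x).mp hx, hy⟩
  · rintro (hy | ⟨x, hx, hy⟩)
    · exact Or.inl ((hm y).mpr hy)
    · exact Or.inr ⟨x, (hm x).mpr hx, hy⟩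

lemma reach_iter_universe (d : PySem.Dict Int (List Int)) (k : Int) :
    ∀ n, ∀ y ∈ (reachStep d)^[n] [k], y = k ∨ y ∈ d.items.flatMap Prod.snd := by
  intro n
  induction n with
  | zero => intro y hy; simp at hy; exact Or.inl hy
  | succ n ih =>
    intro y hy
    rw [Function.iterate_succ_apply'] at hy
    rcases (mem_reachStep d _ y).mp hy with hy | ⟨x, _, hy⟩
    · exact ih y hy
    · right
      cases hget : d.get? x with
      | none =>
        rw [PySem.Dict.getD_eq_get?_getD, hget] at hy
        cases hy
      | some cs =>
        rw [PySem.Dict.getD_eq_get?_getD, hget] at hy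
        exact List.mem_flatMap.mpr ⟨(x, cs), PySem.Dict.mem_items_of_get?_eq_some d hget, hy⟩

lemma reachSet_fixed (d : PySem.Dict Int (List Int)) (k : Int) :
    (reachSet d k).toFinset = (reachStep d (reachSet d k)).toFinset := by
  set N := reachFuel d with hN
  set g : Nat → Finset Int := fun i => ((reachStep d)^[i] [k]).toFinset with hg
  have hmono : ∀ i, g i ⊆ g (i + 1) := by
    intro i y hy
    rw [hg]
    simp only [Function.iterate_succ_apply', List.mem_toFinset]
    exact subset_reachStep d _ (by simpa [hg, List.mem_toFinset] using hy)
  have hstepg : ∀ i j, g i = g j → g (i + 1) = g (j + 1) := by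
    intro i j hij
    rw [hg]
    simp only [Function.iterate_succ_apply']
    exact reachStep_toFinset_congr d _ _ (by simpa [hg] using hij)
  have hex : ∃ i < N, g i = g (i + 1) := by
    by_contra hno
    push_neg at hno
    have hgrow : ∀ i, i ≤ N → i + 1 ≤ (g i).card := by
      intro i
      induction i with
      | zero => intro _; simp [hg]
      | succ i ih =>
        intro hi
        have h1 := ih (by omega)
        have hss : g i ⊂ g (i + 1) :=
          lt_of_le_of_ne (hmono i) (hno i (by omega))
        have := Finset.card_lt_card hss
        omega
    have hbound : (g N).card ≤ N := by
      have hsub : g N ⊆ (k :: d.items.flatMap Prod.snd).toFinset := by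
        intro y hy
        have := reach_iter_universe d k N y (by simpa [hg, List.mem_toFinset] using hy)
        rcases this with h | h <;> simp [h]
      calc (g N).card ≤ (k :: d.items.flatMap Prod.snd).toFinset.card := Finset.card_le_card hsub
        _ ≤ (k :: d.items.flatMap Prod.snd).length := List.toFinset_card_le _
        _ = N := by simp [hN, reachFuel]
    have := hgrow N le_rfl
    omega
  obtain ⟨i, hiN, hfix⟩ := hex
  have hstable : ∀ j, g (i + j) = g i := by
    intro j
    induction j with
    | zero => rfl
    | succ j ih =>
      have : g (i + j + 1) = g (i + 1) := hstepg (i + j) i ih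
      rw [show i + (j + 1) = i + j + 1 by omega, this, ← hfix]
  have h1 : g N = g i := by
    have := hstable (N - i)
    rwa [show i + (N - i) = N by omega] at this
  have h2 : g (N + 1) = g i := by
    have := hstable (N + 1 - i)
    rwa [show i + (N + 1 - i) = N + 1 by omega] at this
  have hgN : (reachSet d k).toFinset = g N := by
    rw [hg]; simp [reachSet, hN]
  have hgS : (reachStep d (reachSet d k)).toFinset = g (N + 1) := by
    rw [hg]
    simp [reachSet, hN, Function.iterate_succ_apply']
  rw [hgN, hgS, h1, h2]

-- closedness in getD form: a child of a reachable node is reachable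
lemma reachSet_closed' (d : PySem.Dict Int (List Int)) (k x c : Int)
    (hx : x ∈ reachSet d k) (hc : c ∈ d.getD x []) :
    c ∈ reachSet d k := by
  have hstep : c ∈ reachStep d (reachSet d k) :=
    (mem_reachStep d _ c).mpr (Or.inr ⟨x, hx, hc⟩)
  have := reachSet_fixed d k
  rw [← List.mem_toFinset, ← this, List.mem_toFinset] at hstep
  exact hstep

lemma reachSet_closed (d : PySem.Dict Int (List Int)) (k x c : Int) (cs : List Int)
    (hx : x ∈ reachSet d k) (hget : d.get? x = some cs) (hc : c ∈ cs) :
    c ∈ reachSet d k := by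
  refine reachSet_closed' d k x c hx ?_
  rw [PySem.Dict.getD_eq_get?_getD, hget]
  exact hc

lemma mem_reachSet_self (d : PySem.Dict Int (List Int)) (k : Int) : k ∈ reachSet d k := by
  unfold reachSet
  generalize reachFuel d = n
  induction n with
  | zero => simp
  | succ n ih =>
    rw [Function.iterate_succ_apply']
    exact subset_reachStep d _ ih

-- transitivity: everything reachable from a reachable node is reachable
lemma reachSet_trans (d : PySem.Dict Int (List Int)) (x y : Int)
    (hy : y ∈ reachSet d x) : ∀ z ∈ reachSet d y, z ∈ reachSet d x := by
  have hiter : ∀ n, ∀ z ∈ (reachStep d)^[n] [y], z ∈ reachSet d x := by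
    intro n
    induction n with
    | zero => intro z hz; simp at hz; exact hz ▸ hy
    | succ n ih =>
      intro z hz
      rw [Function.iterate_succ_apply'] at hz
      rcases (mem_reachStep d _ z).mp hz with hz | ⟨a, ha, hz⟩
      · exact ih z hz
      · exact reachSet_closed' d x a z (ih a ha) hz
  intro z hz
  exact hiter (reachFuel d) z hz

-- ---- rank: recursion-depth measure that strictly drops along reachable edges ----

-- rank of a node: 1 + the number of distinct DICT KEYS reachable from it; under the
-- acyclicity of Pre_ it strictly decreases from a node to each of its children.
def rankOf (d : PySem.Dict Int (List Int)) (x : Int) : Nat :=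
  ((reachSet d x).toFinset ∩ (d.items.map Prod.fst).toFinset).card + 1

lemma pvRank_pos (d : PySem.Dict Int (List Int)) (x : Int) : 1 ≤ rankOf d x := by
  simp [rankOf]

lemma pvRank_le_size (d : PySem.Dict Int (List Int)) (x : Int) :
    rankOf d x ≤ d.size + 1 := by
  have h1 : ((reachSet d x).toFinset ∩ (d.items.map Prod.fst).toFinset).card
      ≤ (d.items.map Prod.fst).toFinset.card :=
    Finset.card_le_card Finset.inter_subset_right
  have h2 : (d.items.map Prod.fst).toFinset.card ≤ (d.items.map Prod.fst).length :=
    List.toFinset_card_le _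
  simp only [rankOf, PySem.Dict.size]
  have h3 : (d.items.map Prod.fst).length = d.items.length := (List.length_map _)
  omega

-- along an edge of the acyclic reachable part the rank strictly decreases
lemma pvRank_get_child (R : List Int) (d : PySem.Dict Int (List Int)) (x c : Int) (cs : List Int)
    (hAcy : ∀ a ∈ R, ∀ b ∈ d.getD a [], a ∉ reachSet d b)
    (hxR : x ∈ R)
    (hget : d.get? x = some cs) (hc : c ∈ cs) : rankOf d c < rankOf d x := by
  have hcgd : c ∈ d.getD x [] := by
    rw [PySem.Dict.getD_eq_get?_getD, hget]; exact hc
  have hcx : c ∈ reachSet d x :=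
    reachSet_closed' d x x c (mem_reachSet_self d x) hcgd
  have hsub : (reachSet d c).toFinset ⊆ (reachSet d x).toFinset := by
    intro z hz
    rw [List.mem_toFinset] at hz ⊢
    exact reachSet_trans d x c hcx z hz
  have hxkey : x ∈ (d.items.map Prod.fst).toFinset := by
    rw [List.mem_toFinset]
    exact List.mem_map.mpr ⟨(x, cs), PySem.Dict.mem_items_of_get?_eq_some d hget, rfl⟩
  have hxnot : x ∉ reachSet d c := hAcy x hxR c hcgd
  have hss : (reachSet d c).toFinset ∩ (d.items.map Prod.fst).toFinset
      ⊂ (reachSet d x).toFinset ∩ (d.items.map Prod.fst).toFinset := by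
    refine Finset.ssubset_iff_of_subset (Finset.inter_subset_inter hsub (Finset.Subset.refl _)) |>.mpr ?_
    refine ⟨x, ?_, ?_⟩
    · exact Finset.mem_inter.mpr ⟨List.mem_toFinset.mpr (mem_reachSet_self d x), hxkey⟩
    · intro hmem
      exact hxnot (List.mem_toFinset.mp (Finset.mem_inter.mp hmem).1)
  have := Finset.card_lt_card hss
  simp only [rankOf]
  omega

-- ---- fuel stability of port A's recursion on the reachable part ----

lemma searchtimeF_succ (ct : List Int) (d : PySem.Dict Int (List Int)) (n : Nat) (k : Int) :
    searchtimeF ct d (n + 1) k = PySem.List.pyGetD ct (k - 1) 0 +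
      (match d.get? k with
       | some cs => cs.foldl (fun temp branch =>
           let getvalue := searchtimeF ct d n branch
           if getvalue > temp then getvalue else temp) 0
       | none => 0) := rfl

-- one extra unit of fuel changes nothing once the fuel covers the rank
lemma stab_succ (R : List Int) (ct : List Int) (d : PySem.Dict Int (List Int))
    (hAcy : ∀ a ∈ R, ∀ b ∈ d.getD a [], a ∉ reachSet d b)
    (hclosed : ∀ x' ∈ R, ∀ cs', d.get? x' = some cs' → ∀ c' ∈ cs', c' ∈ R) :
    ∀ n x, x ∈ R → rankOf d x ≤ n →
      searchtimeF ct d (n + 1) x = searchtimeF ct d n x := by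
  intro n
  induction n using Nat.strong_induction_on with
  | _ n ih =>
    intro x hxR hx
    have h1 : 1 ≤ rankOf d x := pvRank_pos _ _
    obtain ⟨m, rfl⟩ : ∃ m, n = m + 1 := ⟨n - 1, by omega⟩
    rw [searchtimeF_succ, searchtimeF_succ]
    cases hget : d.get? x with
    | none => simp
    | some cs =>
      simp only
      congr 1
      apply PySem.List.foldl_congr_mem
      intro acc c hc
      have hcR : c ∈ R := hclosed x hxR cs hget c hc
      have hlt := pvRank_get_child R d x c cs hAcy hxR hget hc
      rw [ih m (by omega) c hcR (by omega)]

lemma stab_ge (R : List Int) (ct : List Int) (d : PySem.Dict Int (List Int))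
    (hAcy : ∀ a ∈ R, ∀ b ∈ d.getD a [], a ∉ reachSet d b)
    (hclosed : ∀ x' ∈ R, ∀ cs', d.get? x' = some cs' → ∀ c' ∈ cs', c' ∈ R) :
    ∀ n x, x ∈ R → rankOf d x ≤ n →
      searchtimeF ct d n x = searchtimeF ct d (rankOf d x) x := by
  intro n
  induction n with
  | zero => intro x _ hx; exact absurd hx (by have := pvRank_pos d x; omega)
  | succ n ih =>
    intro x hxR hx
    by_cases h : rankOf d x ≤ n
    · rw [stab_succ R ct d hAcy hclosed n x hxR h]; exact ih x hxR h
    · have : rankOf d x = n + 1 := by omega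
      rw [this]

-- the canonical (fuel-free) value of a node
def canonF (ct : List Int) (d : PySem.Dict Int (List Int)) (x : Int) : Int :=
  searchtimeF ct d (rankOf d x) x

lemma canon_unfold (R : List Int) (ct : List Int) (d : PySem.Dict Int (List Int))
    (hAcy : ∀ a ∈ R, ∀ b ∈ d.getD a [], a ∉ reachSet d b)
    (hclosed : ∀ x' ∈ R, ∀ cs', d.get? x' = some cs' → ∀ c' ∈ cs', c' ∈ R)
    (x : Int) (hxR : x ∈ R) :
    canonF ct d x = PySem.List.pyGetD ct (x - 1) 0 +
      (match d.get? x with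
       | some cs => cs.foldl (fun t c => if canonF ct d c > t then canonF ct d c else t) 0
       | none => 0) := by
  have h1 : 1 ≤ rankOf d x := pvRank_pos _ _
  obtain ⟨r, hr⟩ : ∃ r, rankOf d x = r + 1 := ⟨rankOf d x - 1, by omega⟩
  unfold canonF
  rw [hr, searchtimeF_succ]
  cases hget : d.get? x with
  | none => simp
  | some cs =>
    simp only
    congr 1
    apply PySem.List.foldl_congr_mem
    intro acc c hc
    have hcR : c ∈ R := hclosed x hxR cs hget c hc
    have hlt := pvRank_get_child R d x c cs hAcy hxR hget hc
    have heq : searchtimeF ct d r c = canonF ct d c := by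
      unfold canonF
      exact stab_ge R ct d hAcy hclosed r c hcR (by omega)
    rw [heq]
    simp [canonF]

-- ---- correctness of port B's memoized traversal ----

-- memo invariant: every cached value is the node's canonical value
def memInv (ct : List Int) (d : PySem.Dict Int (List Int)) (m : PySem.Dict Int Int) : Prop :=
  ∀ y v, m.get? y = some v → v = canonF ct d y

lemma goB_correct (R : List Int) (ct : List Int) (d : PySem.Dict Int (List Int))
    (hAcy : ∀ a ∈ R, ∀ b ∈ d.getD a [], a ∉ reachSet d b)
    (hclosed : ∀ x' ∈ R, ∀ cs', d.get? x' = some cs' → ∀ c' ∈ cs', c' ∈ R) :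
    ∀ n m x, x ∈ R → rankOf d x ≤ n → memInv ct d m →
      (goB ct d n m x).2 = canonF ct d x ∧ memInv ct d (goB ct d n m x).1 := by
  intro n
  induction n using Nat.strong_induction_on with
  | _ n ih =>
    intro m x hxR hx hm
    have h1 : 1 ≤ rankOf d x := pvRank_pos _ _
    obtain ⟨n', rfl⟩ : ∃ n', n = n' + 1 := ⟨n - 1, by omega⟩
    cases hmget : m.get? x with
    | some v =>
      simp only [goB, hmget]
      exact ⟨hm x v hmget, hm⟩
    | none =>
      cases hget : d.get? x with
      | none =>
        have hgd : d.getD x [] = [] := by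
          rw [PySem.Dict.getD_eq_get?_getD, hget]; rfl
        simp only [goB, hmget, hgd, List.foldl_nil]
        constructor
        · rw [canon_unfold R ct d hAcy hclosed x hxR, hget]
        · intro y v hy
          rw [PySem.Dict.get?_insert] at hy
          split at hy
          · rename_i hyx
            cases hy
            rw [hyx, canon_unfold R ct d hAcy hclosed x hxR, hget]
          · exact hm y v hy
      | some cs =>
        have hgd : d.getD x [] = cs := by
          rw [PySem.Dict.getD_eq_get?_getD, hget]; rfl
        have hfold : ∀ (l : List Int), (∀ c ∈ l, c ∈ R ∧ rankOf d c ≤ n') →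
            ∀ (m0 : PySem.Dict Int Int) (t : Int), memInv ct d m0 →
            (l.foldl (fun (st : PySem.Dict Int Int × Int) c =>
                let r := goB ct d n' st.1 c
                (r.1, if r.2 > st.2 then r.2 else st.2)) (m0, t)).2 =
              l.foldl (fun t c => if canonF ct d c > t then canonF ct d c else t) t ∧
            memInv ct d (l.foldl (fun (st : PySem.Dict Int Int × Int) c =>
                let r := goB ct d n' st.1 c
                (r.1, if r.2 > st.2 then r.2 else st.2)) (m0, t)).1 := by
          intro l
          induction l with
          | nil => intro _ m0 t hm0; exact ⟨rfl, hm0⟩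
          | cons c l' ihl =>
            intro hranks m0 t hm0
            have hrc := hranks c (List.mem_cons_self)
            have hstep := ih n' (by omega) m0 c hrc.1 hrc.2 hm0
            simp only [List.foldl_cons]
            have hrest := ihl (fun c' hc' => hranks c' (List.mem_cons_of_mem _ hc'))
              (goB ct d n' m0 c).1 (if (goB ct d n' m0 c).2 > t then (goB ct d n' m0 c).2 else t)
              hstep.2
            rw [← hstep.1]
            exact hrest
        have hranks : ∀ c ∈ cs, c ∈ R ∧ rankOf d c ≤ n' := by
          intro c hc
          have h2 := pvRank_get_child R d x c cs hAcy hxR hget hc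
          exact ⟨hclosed x hxR cs hget c hc, by omega⟩
        have hmain := hfold cs hranks m 0 hm
        simp only [goB, hmget, hgd]
        constructor
        · rw [hmain.1, canon_unfold R ct d hAcy hclosed x hxR, hget]
        · intro y v hy
          rw [PySem.Dict.get?_insert] at hy
          split at hy
          · rename_i hyx
            cases hy
            rw [hyx, canon_unfold R ct d hAcy hclosed x hxR, hget]
            rw [hmain.1]
          · exact hmain.2 y v hy

-- ===== VERDICT (by name: the statement is the Claim_ definition above) =====
theorem searchtime_spec : Claim_equal_searchtime := by
  intro ct trees k _hdom hpre
  obtain ⟨_hval, hAcy⟩ := hpre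
  show searchtime ct trees k = searchtime_alt ct trees k
  unfold searchtime searchtime_alt
  set d := PySem.Dict.ofList trees with hd
  set R := reachSet d k with hR
  have hclosed : ∀ x' ∈ R, ∀ cs', d.get? x' = some cs' → ∀ c' ∈ cs', c' ∈ R := by
    intro x' hx' cs' hget c' hc'
    exact reachSet_closed d k x' c' cs' hx' hget hc'
  have hkR : k ∈ R := mem_reachSet_self d k
  have hrank : rankOf d k ≤ d.size + 1 := pvRank_le_size d k
  have hA : searchtimeF ct d (d.size + 1) k = canonF ct d k :=
    stab_ge R ct d hAcy hclosed (d.size + 1) k hkR hrank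
  have hB := goB_correct R ct d hAcy hclosed (d.size + 1) PySem.Dict.empty k hkR hrank
    (by intro y v hy; simp [PySem.Dict.get?_empty] at hy)
  rw [hA, hB.1]
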